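-- pv_equiv track=rewrite | github.com/javokhirbek1999/CodeSignal | Arcade/The-Core/Loop-Tunnel/rounders.py | rounders
-- ===== SOURCE A (Python) =====
-- def rounders(n):
--     s = [int(i) for i in list(str(n))]
--     k = -1
--     for i in range(len(s)-1):
--         if s[k] != 0 and s[k] >= 5:
--             s[k] = 0
--             s[k-1] +=1
--         elif s[k] != 0 and s[k] < 5:
--             s[k] = 0
--         k-=1
--     return int("".join([str(i) for i in s]))
-- ===== SOURCE B (Python) =====
-- def rounders(n):
--     place = 1
--     for _ in range(len(str(n)) - 1):
--         place *= 10
--         n = (n + place // 2) // place * place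
--     return n
-- ===== Notes on version B (the rewrite author's own statement) =====
-- stated objective: simpler
-- what changed: Replaces A's mutable digit-list (string conversion, negative-index digit zeroing with manual carry, re-join and re-parse) by pure integer arithmetic: one loop that rounds half-up to each successive power of ten via n = (n + place//2)//place*place.
import Mathlib
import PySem

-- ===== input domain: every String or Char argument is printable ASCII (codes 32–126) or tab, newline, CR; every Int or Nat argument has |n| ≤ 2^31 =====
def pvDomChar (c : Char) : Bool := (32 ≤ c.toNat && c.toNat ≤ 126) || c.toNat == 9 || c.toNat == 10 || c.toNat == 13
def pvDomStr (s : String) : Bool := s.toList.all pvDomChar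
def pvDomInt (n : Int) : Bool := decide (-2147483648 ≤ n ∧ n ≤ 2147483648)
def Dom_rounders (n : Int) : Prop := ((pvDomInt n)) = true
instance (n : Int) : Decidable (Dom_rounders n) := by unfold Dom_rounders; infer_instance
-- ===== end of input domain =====

-- B replaces A's mutable digit-list rounding by pure integer arithmetic
-- (round half-up at each power of ten via (n + place//2)//place*place); objective: simpler.

-- ===== PORT A =====
-- int(i) for the one-character string i; exact on the digit characters str(n) yields for n ≥ 0 (Pre_).
def roundersCharVal (c : Char) : Int := (PySem.Int.ofChars? [c]).getD 0

-- one iteration of A's for-loop body; A's variable k equals -1 - i after i decrements.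
-- Indexing/assignment use the total pyGetD/pySetD: inside Pre_ every index A uses is in range.
def roundersStep (s : List Int) (i : Int) : List Int :=
  let k : Int := -1 - i
  let d := PySem.List.pyGetD s k 0
  if d ≠ 0 ∧ 5 ≤ d then
    let s1 := PySem.List.pySetD s k 0
    PySem.List.pySetD s1 (k - 1) (PySem.List.pyGetD s1 (k - 1) 0 + 1)
  else if d ≠ 0 ∧ d < 5 then
    PySem.List.pySetD s k 0
  else s

def rounders (n : Int) : Int :=
  let s0 := (PySem.Int.toChars n).map roundersCharVal
  let s := (PySem.List.pyRange 0 (PySem.List.len s0 - 1) 1).foldl roundersStep s0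
  -- int("".join([str(i) for i in s])); the parse never fails inside Pre_ (nonempty digit string)
  (PySem.Int.ofChars? (PySem.Chars.join [] (s.map PySem.Int.toChars))).getD 0

-- ===== PORT B =====
-- one iteration of B's loop over the state (n, place)
def roundersAltStep (st : Int × Int) (_i : Int) : Int × Int :=
  let place := st.2 * 10
  (PySem.Int.floordiv (st.1 + PySem.Int.floordiv place 2) place * place, place)

def rounders_alt (n : Int) : Int :=
  ((PySem.List.pyRange 0 (PySem.List.len (PySem.Int.toChars n) - 1) 1).foldl
      roundersAltStep (n, 1)).1

-- ===== PRECONDITION & SPEC =====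
-- A raises ValueError on n < 0 (int('-') while converting the sign character); Pre_ keeps n ≥ 0.
def Pre_rounders (n : Int) : Prop := 0 ≤ n
instance (n : Int) : Decidable (Pre_rounders n) := by unfold Pre_rounders; infer_instance
def pvWitness_rounders : Int := 4445

def Spec_rounders (n : Int) (out : Int) : Prop := out = rounders_alt n
instance (n : Int) (out : Int) : Decidable (Spec_rounders n out) := by unfold Spec_rounders; infer_instance

-- ===== CLAIM (what is proved, stated in full; the proofs are below) =====
def Claim_equal_rounders : Prop := ∀ (n : Int), Dom_rounders n → Pre_rounders n → Spec_rounders n (rounders n)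

-- ===== LEMMAS AND PROOFS =====

-- the integer a digit list denotes (most significant digit first)
def valA (t : List Int) : Int := t.foldl (fun a d => 10 * a + d) 0

theorem valA_append_singleton (q : List Int) (d : Int) :
    valA (q ++ [d]) = 10 * valA q + d := by
  simp [valA, List.foldl_append]

theorem roundersCharVal_digitChar (d : Nat) (hd : d < 10) :
    roundersCharVal (Nat.digitChar d) = (d : Int) := by
  interval_cases d <;> decide

-- assignment at a negative in-range index
theorem pySetD_neg_natCast (xs : List Int) (k : Nat) (v : Int)
    (h1 : 0 < k) (h2 : k ≤ xs.length) :
    PySem.List.pySetD xs (-(k : Int)) v = xs.set (xs.length - k) v := by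
  unfold PySem.List.pySetD PySem.List.pySet? PySem.List.pyIdx?
  have hneg : ¬ (0:Int) ≤ -(k:Int) := by omega
  rw [if_neg hneg, if_pos (by omega : -((xs.length:Int)) ≤ -(k:Int))]
  simp

theorem getElem_mid (q : List Int) (d : Int) (z : List Int) (i : Nat) (h : i = q.length)
    (hw : i < ((q ++ [d]) ++ z).length) : ((q ++ [d]) ++ z)[i] = d := by
  subst h
  rw [List.getElem_append_left (by simp)]
  exact List.getElem_concat_length rfl _

theorem set_mid (q : List Int) (d v : Int) (z : List Int) (i : Nat) (h : i = q.length) :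
    ((q ++ [d]) ++ z).set i v = (q ++ [v]) ++ z := by
  subst h
  rw [List.set_append, if_pos (by simp), List.set_append, if_neg (lt_irrefl _), Nat.sub_self]
  simp

-- characterisation of Nat.toDigitsCore 10: a nonempty block of decimal digit characters
theorem toDigitsCore_spec : ∀ (f m : Nat) (acc : List Char), m < f →
    ∃ t : List Char, Nat.toDigitsCore 10 f m acc = t ++ acc ∧ t ≠ [] ∧
      (∀ c ∈ t, ∃ d : Nat, d < 10 ∧ c = Nat.digitChar d) ∧
      ∀ a : Int, (t.map roundersCharVal).foldl (fun x e => 10 * x + e) a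
        = a * 10 ^ t.length + m := by
  intro f
  induction f with
  | zero => intro m acc h; omega
  | succ f ih =>
    intro m acc h
    rw [Nat.toDigitsCore]
    by_cases h10 : m / 10 = 0
    · refine ⟨[Nat.digitChar (m % 10)], by simp [h10], by simp, ?_, ?_⟩
      · intro c hc
        simp at hc
        exact ⟨m % 10, Nat.mod_lt _ (by norm_num), hc⟩
      · intro a
        simp only [List.map_cons, List.map_nil, List.foldl_cons, List.foldl_nil,
          List.length_cons, List.length_nil, zero_add, pow_one,
          roundersCharVal_digitChar (m % 10) (Nat.mod_lt _ (by norm_num))]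
        omega
    · rw [if_neg h10]
      obtain ⟨t, ht, hne, hdig, hval⟩ := ih (m / 10) (Nat.digitChar (m % 10) :: acc) (by omega)
      refine ⟨t ++ [Nat.digitChar (m % 10)], by simp [ht], by simp, ?_, ?_⟩
      · intro c hc
        rcases List.mem_append.1 hc with hc | hc
        · exact hdig c hc
        · simp at hc
          exact ⟨m % 10, Nat.mod_lt _ (by norm_num), hc⟩
      · intro a
        rw [List.map_append, List.foldl_append, hval a]
        simp only [List.map_cons, List.map_nil, List.foldl_cons, List.foldl_nil,
          List.length_append, List.length_cons, List.length_nil, zero_add, pow_succ,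
          roundersCharVal_digitChar (m % 10) (Nat.mod_lt _ (by norm_num))]
        have hsplit : (m : Int) = 10 * ((m / 10 : Nat) : Int) + ((m % 10 : Nat) : Int) := by
          omega
        rw [hsplit]
        ring

-- B's loop body, applied to the rounded-so-far state
theorem altStep_eq (v d : Int) (j : Nat) (h0 : 0 ≤ d) (h10 : d ≤ 10) (i : Int) :
    roundersAltStep ((10 * v + d) * 10 ^ j, 10 ^ j) i
      = ((v + if 5 ≤ d then 1 else 0) * 10 ^ (j + 1), 10 ^ (j + 1)) := by
  have hp : (0:Int) < 10 ^ j := by positivity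
  unfold roundersAltStep
  have h2 : PySem.Int.floordiv ((10:Int) ^ j * 10) 2 = 5 * 10 ^ j := by
    rw [PySem.Int.floordiv_eq_iff_of_pos (by norm_num)]
    constructor <;> nlinarith
  have h3 : PySem.Int.floordiv ((10 * v + d) * 10 ^ j + 5 * 10 ^ j) (10 ^ j * 10)
      = v + if 5 ≤ d then 1 else 0 := by
    rw [PySem.Int.floordiv_eq_iff_of_pos (by positivity)]
    split_ifs with h5 <;> constructor <;> nlinarith
  simp only [h2, h3, pow_succ]

-- the joint loop invariant: after j iterations A's list is t ++ [0,…,0]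
-- and B's state is (valA t · 10^j, 10^j)
theorem loop_inv (s0 : List Int) (n : Int)
    (hval : valA s0 = n) (hd : ∀ e ∈ s0, 0 ≤ e ∧ e ≤ 9) :
    ∀ j : Nat, j + 1 ≤ s0.length →
    ∃ t : List Int,
      (PySem.List.pyRange 0 (j : Int) 1).foldl roundersStep s0 = t ++ List.replicate j 0 ∧
      t.length + j = s0.length ∧
      (∀ e ∈ t.dropLast, 0 ≤ e ∧ e ≤ 9) ∧
      (∀ e ∈ t, 0 ≤ e ∧ e ≤ 10) ∧
      (PySem.List.pyRange 0 (j : Int) 1).foldl roundersAltStep (n, 1)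
        = (valA t * 10 ^ j, 10 ^ j) := by
  intro j
  induction j with
  | zero =>
    intro _
    refine ⟨s0, ?_, by simp, ?_, ?_, ?_⟩
    · simp [PySem.List.pyRange_one_eq_nil (le_refl (0:Int))]
    · exact fun e he => hd e (List.dropLast_subset _ he)
    · exact fun e he => ⟨(hd e he).1, le_trans (hd e he).2 (by norm_num)⟩
    · simp [PySem.List.pyRange_one_eq_nil (le_refl (0:Int)), hval]
  | succ j ihj =>
    intro hj2
    obtain ⟨t, hfold, hlen, hq9', ht10, hB⟩ := ihj (by omega)
    have htlen2 : 2 ≤ t.length := by omega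
    have htne : t ≠ [] := by intro h; rw [h] at htlen2; simp at htlen2
    obtain ⟨q, d, hqd⟩ : ∃ q d, t = q ++ [d] :=
      ⟨t.dropLast, t.getLast htne, (List.dropLast_append_getLast htne).symm⟩
    have hq9 : ∀ e ∈ q, 0 ≤ e ∧ e ≤ 9 := by
      intro e he; exact hq9' e (by simp [hqd, he])
    have hqlen : q.length + 1 = t.length := by simp [hqd]
    have hqne : q ≠ [] := by intro h; rw [h] at hqlen; simp at hqlen; omega
    obtain ⟨r, g, hrg⟩ : ∃ r g, q = r ++ [g] :=
      ⟨q.dropLast, q.getLast hqne, (List.dropLast_append_getLast hqne).symm⟩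
    have hrlen : r.length + 1 = q.length := by simp [hrg]
    have hdmem : d ∈ t := by simp [hqd]
    have hd0 : 0 ≤ d := (ht10 d hdmem).1
    have hd10 : d ≤ 10 := (ht10 d hdmem).2
    have hg9 : 0 ≤ g ∧ g ≤ 9 := hq9 g (by simp [hrg])
    have hrange : PySem.List.pyRange 0 ((j+1 : Nat) : Int) 1
        = PySem.List.pyRange 0 ((j : Nat) : Int) 1 ++ [(j : Int)] := by
      push_cast
      exact PySem.List.pyRange_one_succ_right (by positivity)
    rw [hrange, List.foldl_append, List.foldl_append, hfold, hB]
    simp only [List.foldl_cons, List.foldl_nil]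
    have hcast1 : (-1 - (j:Int)) = -(((j+1 : Nat) : Int)) := by push_cast; ring
    have hlen1 : ((q ++ [d]) ++ List.replicate j 0).length = q.length + 1 + j := by
      simp only [List.length_append, List.length_cons, List.length_nil, List.length_replicate]
    have hread1 : PySem.List.pyGetD (t ++ List.replicate j 0) (-1 - (j:Int)) 0 = d := by
      rw [hqd, hcast1, PySem.List.pyGetD_neg_natCast _ _ _ (by omega) (by rw [hlen1]; omega)]
      exact getElem_mid q d _ _ (by rw [hlen1]; omega) _
    have hset1 : PySem.List.pySetD (t ++ List.replicate j 0) (-1 - (j:Int)) 0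
        = q ++ List.replicate (j+1) 0 := by
      rw [hqd, hcast1, pySetD_neg_natCast _ _ _ (by omega) (by rw [hlen1]; omega)]
      rw [hlen1, set_mid q d 0 _ _ (by omega)]
      simp [List.replicate_succ]
    have hvt : valA t = 10 * valA q + d := by rw [hqd]; exact valA_append_singleton q d
    have hBstep := altStep_eq (valA q) d j hd0 hd10 (j : Int)
    rw [hvt]
    unfold roundersStep
    simp only [hread1]
    by_cases h5 : 5 ≤ d
    · rw [if_pos ⟨by omega, h5⟩]
      simp only [hset1]
      have hregroup : q ++ List.replicate (j+1) 0
          = (r ++ [g]) ++ ((0:Int) :: List.replicate j 0) := by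
        rw [hrg, List.replicate_succ]
      have hcast2 : (-1 - (j:Int) - 1) = -(((j+2 : Nat) : Int)) := by push_cast; ring
      have hlen2 : ((r ++ [g]) ++ ((0:Int) :: List.replicate j 0)).length
          = r.length + 1 + (j+1) := by
        simp only [List.length_append, List.length_cons, List.length_nil, List.length_replicate]
      have hread2 : PySem.List.pyGetD (q ++ List.replicate (j+1) 0) (-1 - (j:Int) - 1) 0
          = g := by
        rw [hregroup, hcast2, PySem.List.pyGetD_neg_natCast _ _ _ (by omega)
          (by rw [hlen2]; omega)]
        exact getElem_mid r g _ _ (by rw [hlen2]; omega) _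
      have hset2 : PySem.List.pySetD (q ++ List.replicate (j+1) 0) (-1 - (j:Int) - 1) (g+1)
          = (r ++ [g+1]) ++ List.replicate (j+1) 0 := by
        rw [hregroup, hcast2, pySetD_neg_natCast _ _ _ (by omega) (by rw [hlen2]; omega)]
        rw [hlen2, set_mid r g (g+1) _ _ (by omega)]
        rw [List.replicate_succ]
      rw [hread2, hset2]
      refine ⟨r ++ [g+1], rfl, ?_, ?_, ?_, ?_⟩
      · simp only [List.length_append, List.length_cons, List.length_nil]
        omega
      · intro e he
        rw [List.dropLast_concat] at he
        exact hq9 e (by simp [hrg, he])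
      · intro e he
        rcases List.mem_append.1 he with he | he
        · have := hq9 e (by simp [hrg, he])
          omega
        · simp at he
          subst he
          omega
      · rw [hBstep, if_pos h5]
        have hv' : valA (r ++ [g+1]) = valA q + 1 := by
          rw [valA_append_singleton, hrg, valA_append_singleton]
          ring
        rw [hv']
    · rw [if_neg (by tauto)]
      have hfin : (if d ≠ 0 ∧ d < 5
            then PySem.List.pySetD (t ++ List.replicate j 0) (-1 - (j:Int)) 0
            else t ++ List.replicate j 0) = q ++ List.replicate (j+1) 0 := by
        by_cases h0 : d = 0
        · rw [if_neg (by tauto), hqd, h0]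
          simp [List.replicate_succ]
        · rw [if_pos ⟨h0, by omega⟩, hset1]
      rw [hfin]
      refine ⟨q, rfl, by omega, ?_, ?_, ?_⟩
      · exact fun e he => hq9 e (List.dropLast_subset _ he)
      · exact fun e he => ⟨(hq9 e he).1, by have := (hq9 e he).2; omega⟩
      · rw [hBstep, if_neg h5]
        ring_nf

-- final parse: int of the joined digit string of [d0, 0, …, 0]
theorem final_parse (d0 : Int) (r : Nat) (h0 : 0 ≤ d0) (h1 : d0 ≤ 10) (hr : r ≤ 9) :
    (PySem.Int.ofChars? (PySem.Chars.join []
        ((d0 :: List.replicate r 0).map PySem.Int.toChars))).getD 0 = d0 * 10 ^ r := by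
  interval_cases d0 <;> interval_cases r <;> decide

-- ===== VERDICT (by name: the statement is the Claim_ definition above) =====
theorem rounders_spec : Claim_equal_rounders := by
  unfold Claim_equal_rounders Spec_rounders Pre_rounders Dom_rounders
  intro n hdom hpre
  have hbound : n ≤ 2147483648 := by
    simp [pvDomInt] at hdom
    exact hdom.2
  have hnm : ((n.toNat : Nat) : Int) = n := Int.toNat_of_nonneg hpre
  have htc : PySem.Int.toChars n = Nat.toDigits 10 n.toNat := by
    unfold PySem.Int.toChars
    rw [if_neg (by omega)]
  obtain ⟨t, ht, htne, hdig, hvalf⟩ := toDigitsCore_spec (n.toNat + 1) n.toNat [] (by omega)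
  have htd : PySem.Int.toChars n = t := by
    rw [htc, Nat.toDigits, ht, List.append_nil]
  have hL10 : t.length ≤ 10 := by
    rw [← htd, htc]
    exact Nat.toDigits_length 10 n.toNat 10 (by norm_num) (by omega)
  have htpos : 1 ≤ t.length := List.length_pos_iff.2 htne
  have hs0len : (t.map roundersCharVal).length = t.length := List.length_map ..
  have hs0val : valA (t.map roundersCharVal) = n := by
    unfold valA
    rw [hvalf 0, hnm]
    ring
  have hs0d : ∀ e ∈ t.map roundersCharVal, 0 ≤ e ∧ e ≤ 9 := by
    intro e he
    obtain ⟨c, hc, hce⟩ := List.mem_map.1 he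
    obtain ⟨d, hd10, hcd⟩ := hdig c hc
    rw [← hce, hcd, roundersCharVal_digitChar d hd10]
    omega
  obtain ⟨tf, hfoldf, hlenf, _, htf10, hBf⟩ :=
    loop_inv (t.map roundersCharVal) n hs0val hs0d (t.length - 1) (by omega)
  obtain ⟨d0, htf⟩ : ∃ d0, tf = [d0] := by
    apply List.length_eq_one_iff.1
    rw [hs0len] at hlenf
    omega
  have hd0b : 0 ≤ d0 ∧ d0 ≤ 10 := htf10 d0 (by simp [htf])
  have hcastL : (PySem.List.len (t.map roundersCharVal) : Int) - 1
      = ((t.length - 1 : Nat) : Int) := by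
    simp [PySem.List.len_eq, hs0len]
    omega
  -- evaluate port A
  have hA : rounders n = d0 * 10 ^ (t.length - 1) := by
    unfold rounders
    simp only [htd]
    rw [hcastL, hfoldf, htf]
    have : ([d0] ++ List.replicate (t.length - 1) 0) = d0 :: List.replicate (t.length - 1) 0 := by
      simp
    rw [this, final_parse d0 (t.length - 1) hd0b.1 hd0b.2 (by omega)]
  -- evaluate port B
  have hB : rounders_alt n = d0 * 10 ^ (t.length - 1) := by
    unfold rounders_alt
    have hcastL' : (PySem.List.len (PySem.Int.toChars n) : Int) - 1
        = ((t.length - 1 : Nat) : Int) := by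
      simp [PySem.List.len_eq, htd]
      omega
    rw [hcastL', hBf, htf]
    simp [valA]
  rw [hA, hB]
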